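-- pv_equiv track=rewrite | github.com/pypi-data/pypi-mirror-337 | packages/xplainsim/xplainsim-0.0.2.tar.gz/xplainsim-0.0.2/xplain/attribution/postprocessing.py | mpnet_tokenizer_merge_subtokens
-- ===== SOURCE A (Python) =====
-- import string
--
-- def mpnet_tokenizer_merge_subtokens(tokens):
--     """
--     Merges sub-tokens into their original tokens.  Used for: "all-mpnet-base-v2"
--
--     Args:
--         tokens (list of str): List of sub-tokens.
--
--     Returns:
--         merged_tokens (list of str): List of merged tokens.
--         index_map (list of list of int): Mapping from merged tokens to their original sub-token indices.
--     """
--     merged_tokens = []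
--     index_map = []
--     current_token = ""
--     current_indices = []
--
--     for i, token in enumerate(tokens):
--         if token in ['CLS', 'EOS'] or token in string.punctuation:  # Special tokens and punctuation
--             if current_token:  # Add any current token being built
--                 merged_tokens.append(current_token)
--                 index_map.append(current_indices)
--             merged_tokens.append(token)  # Add the special token or punctuation
--             index_map.append([i])
--             current_token = ""
--             current_indices = []
--         elif token.startswith('##'): # extra subtoken
--             current_token += token[2:] # remove the extra '##'
--             current_indices.append(i)
--         else:
--             if current_token:  # If there's an existing token, add it to the list
--                 merged_tokens.append(current_token)
--                 index_map.append(current_indices)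
--             current_token = token
--             current_indices = [i]
--
--     # Add the last token if it exists
--     if current_token:
--         merged_tokens.append(current_token)
--         index_map.append(current_indices)
--
--     return merged_tokens, index_map
-- ===== SOURCE B (Python) =====
-- import string
--
-- def mpnet_tokenizer_merge_subtokens(tokens):
--     # Two-pass re-implementation: first group sub-token indices, then render
--     # the merged strings from the groups.  A group is emitted only when it
--     # merges to a nonempty string.
--     index_map = []
--     group = []
--     has_content = False
--     for i, token in enumerate(tokens):
--         if token in ['CLS', 'EOS'] or token in string.punctuation:
--             if has_content:
--                 index_map.append(group)
--             index_map.append([i])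
--             group, has_content = [], False
--         elif token.startswith('##'):
--             group = group + [i]
--             has_content = has_content or len(token) > 2
--         else:
--             if has_content:
--                 index_map.append(group)
--             group, has_content = [i], True
--     if has_content:
--         index_map.append(group)
--     merged_tokens = [
--         ''.join(tokens[j][2:] if tokens[j].startswith('##') else tokens[j]
--                 for j in g)
--         for g in index_map
--     ]
--     return merged_tokens, index_map
-- ===== Notes on version B (the rewrite author's own statement) =====
-- stated objective: alternative
-- what changed: A builds the merged string and the index group together in one stateful loop; B first groups sub-token indices in one pass (tracking only a boolean 'merges to a nonempty token' flag) and then renders each merged token from its index group in a second pass.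
import Mathlib
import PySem

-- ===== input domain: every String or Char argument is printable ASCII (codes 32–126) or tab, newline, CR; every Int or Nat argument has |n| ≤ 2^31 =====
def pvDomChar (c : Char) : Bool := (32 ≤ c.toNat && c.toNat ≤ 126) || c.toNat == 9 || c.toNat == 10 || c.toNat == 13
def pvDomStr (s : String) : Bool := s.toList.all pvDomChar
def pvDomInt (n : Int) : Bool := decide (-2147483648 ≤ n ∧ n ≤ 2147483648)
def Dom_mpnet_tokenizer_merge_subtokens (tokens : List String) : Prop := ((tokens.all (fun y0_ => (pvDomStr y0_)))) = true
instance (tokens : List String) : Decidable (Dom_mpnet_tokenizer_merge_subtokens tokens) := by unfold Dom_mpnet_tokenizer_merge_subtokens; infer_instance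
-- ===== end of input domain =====

-- B replaces A's single string-building loop by a two-pass decomposition:
-- one pass grouping sub-token indices (tracking only whether the group merges
-- to a nonempty token), then a second pass rendering each group to its string.

-- string.punctuation
def pvPunct : String := "!\"#$%&'()*+,-./:;<=>?@[\\]^_`{|}~"

-- ===== PORT A =====
def pvStepA (s : List String × List (List Int) × String × List Int)
    (p : Int × String) : List String × List (List Int) × String × List Int :=
  match s, p with
  | (merged, imap, cur, curIdx), (i, token) =>
    if (token == "CLS" || token == "EOS" || PySem.Str.isIn token pvPunct) then
      ((if cur ≠ "" then merged ++ [cur] else merged) ++ [token],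
       (if cur ≠ "" then imap ++ [curIdx] else imap) ++ [[i]], "", ([] : List Int))
    else if PySem.Str.startswith token "##" then
      (merged, imap, cur ++ PySem.Str.slice token (some 2) none, curIdx ++ [i])
    else
      ((if cur ≠ "" then merged ++ [cur] else merged),
       (if cur ≠ "" then imap ++ [curIdx] else imap), token, ([i] : List Int))

def mpnet_tokenizer_merge_subtokens (tokens : List String) : List String × List (List Int) :=
  match (PySem.List.enumerate tokens).foldl pvStepA ([], [], "", []) with
  | (merged, imap, cur, curIdx) =>
    if cur ≠ "" then (merged ++ [cur], imap ++ [curIdx]) else (merged, imap)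

-- ===== PORT B =====
-- one rendered piece: tokens[j][2:] if tokens[j].startswith('##') else tokens[j]
def pvPiece (tokens : List String) (j : Int) : String :=
  if PySem.Str.startswith (PySem.List.pyGetD tokens j "") "##" then
    PySem.Str.slice (PySem.List.pyGetD tokens j "") (some 2) none
  else PySem.List.pyGetD tokens j ""

def pvRender (tokens : List String) (g : List Int) : String :=
  PySem.Str.join "" (g.map (pvPiece tokens))

def pvStepB (s : List (List Int) × List Int × Bool)
    (p : Int × String) : List (List Int) × List Int × Bool :=
  match s, p with
  | (imap, group, hasC), (i, token) =>
    if (token == "CLS" || token == "EOS" || PySem.Str.isIn token pvPunct) then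
      ((if hasC then imap ++ [group] else imap) ++ [[i]], ([] : List Int), false)
    else if PySem.Str.startswith token "##" then
      (imap, group ++ [i], hasC || decide (2 < PySem.Str.len token))
    else
      ((if hasC then imap ++ [group] else imap), ([i] : List Int), true)

def mpnet_tokenizer_merge_subtokens_alt (tokens : List String) : List String × List (List Int) :=
  match (PySem.List.enumerate tokens).foldl pvStepB ([], [], false) with
  | (imap, group, hasC) =>
    let imap' := if hasC then imap ++ [group] else imap
    (imap'.map (pvRender tokens), imap')

-- ===== PRECONDITION & SPEC =====
def Spec_mpnet_tokenizer_merge_subtokens (tokens : List String) (out : List String × List (List Int)) : Prop := out = mpnet_tokenizer_merge_subtokens_alt tokens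
instance (tokens : List String) (out : List String × List (List Int)) : Decidable (Spec_mpnet_tokenizer_merge_subtokens tokens out) := by unfold Spec_mpnet_tokenizer_merge_subtokens; infer_instance

-- ===== CLAIM (what is proved, stated in full; the proofs are below) =====
def Claim_equal_mpnet_tokenizer_merge_subtokens : Prop := ∀ (tokens : List String), Dom_mpnet_tokenizer_merge_subtokens tokens → Spec_mpnet_tokenizer_merge_subtokens tokens (mpnet_tokenizer_merge_subtokens tokens)

-- ===== LEMMAS AND PROOFS =====

-- the invariant tying A's loop state to B's
def pvRel (tokens : List String)
    (sa : List String × List (List Int) × String × List Int)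
    (sb : List (List Int) × List Int × Bool) : Prop :=
  sb.1.map (pvRender tokens) = sa.1 ∧ sb.1 = sa.2.1 ∧ sb.2.1 = sa.2.2.2 ∧
  pvRender tokens sb.2.1 = sa.2.2.1 ∧ sb.2.2 = decide (sa.2.2.1 ≠ "")

theorem pvJoin_empty_append (l : List (List Char)) (x : List Char) :
    PySem.Chars.join [] (l ++ [x]) = PySem.Chars.join [] l ++ x := by
  induction l with
  | nil => simp [PySem.Chars.join_singleton, PySem.Chars.join_nil]
  | cons a l ih =>
    cases l with
    | nil => simp [PySem.Chars.join_cons_cons, PySem.Chars.join_singleton]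
    | cons b l' =>
      simp only [List.cons_append, PySem.Chars.join_cons_cons] at *
      simp [ih, List.append_assoc]

theorem pvEmpty_iff (s : String) : s = "" ↔ s.toList = [] := by
  rw [← String.toList_inj]
  simp

theorem pvRender_nil (tokens : List String) : pvRender tokens [] = "" := by
  rw [pvEmpty_iff]
  simp [pvRender, PySem.Str.toList_join, PySem.Chars.join_nil]

theorem pvRender_append (tokens : List String) (g : List Int) (i : Int) :
    pvRender tokens (g ++ [i]) = pvRender tokens g ++ pvPiece tokens i := by
  rw [← String.toList_inj]
  simp only [pvRender, String.toList_append, PySem.Str.toList_join, List.map_append,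
    List.map_cons, List.map_nil]
  have h0 : ("" : String).toList = [] := by simp
  rw [h0, pvJoin_empty_append]

theorem pvRender_singleton (tokens : List String) (i : Int) :
    pvRender tokens [i] = pvPiece tokens i := by
  have := pvRender_append tokens [] i
  simpa [pvRender_nil] using this

theorem pvSpecial_not_hash (t : String)
    (h : (t == "CLS" || t == "EOS" || PySem.Str.isIn t pvPunct) = true) :
    PySem.Str.startswith t "##" = false := by
  rcases Bool.eq_false_or_eq_true (PySem.Str.startswith t "##") with hst | hst
  swap
  · exact hst
  · exfalso
    have hpre : ("##" : String).toList <+: t.toList := by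
      have := (PySem.Chars.startswith_iff t.toList ("##" : String).toList).mp
        (by rw [← PySem.Str.startswith_eq]; exact hst)
      exact this
    have h3 : (t = "CLS" ∨ t = "EOS") ∨ PySem.Chars.isIn t.toList pvPunct.toList = true := by
      simpa using h
    rcases h3 with (h1 | h1) | h1
    · subst h1; exact absurd hpre (by decide)
    · subst h1; exact absurd hpre (by decide)
    · have hinf : t.toList <:+: pvPunct.toList :=
        (PySem.Chars.isIn_iff_infix t.toList pvPunct.toList).mp h1
      have : ("##" : String).toList <:+: pvPunct.toList := hpre.isInfix.trans hinf
      exact absurd this (by decide)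

theorem pvNonpunct_ne_empty (t : String)
    (h : (t == "CLS" || t == "EOS" || PySem.Str.isIn t pvPunct) = false) : t ≠ "" := by
  intro he
  subst he
  simp [PySem.Chars.isIn_nil] at h

theorem pvSlice_toList (t : String) :
    (PySem.Str.slice t (some 2) none).toList = t.toList.drop 2 := by
  rw [PySem.Str.toList_slice, PySem.Chars.slice_eq_listSlice,
    PySem.List.slice_from _ (by norm_num : (0:Int) ≤ 2)]
  rfl

theorem pvStep_rel (tokens : List String) (i : Int) (t : String)
    (ht : PySem.List.pyGetD tokens i "" = t)
    (sa : List String × List (List Int) × String × List Int)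
    (sb : List (List Int) × List Int × Bool)
    (h : pvRel tokens sa sb) : pvRel tokens (pvStepA sa (i, t)) (pvStepB sb (i, t)) := by
  obtain ⟨merged, imap, cur, curIdx⟩ := sa
  obtain ⟨imapB, group, hasC⟩ := sb
  obtain ⟨h1, h2, h3, h4, h5⟩ := h
  simp only [pvRel] at h1 h2 h3 h4 h5 ⊢
  subst h5 h4 h3 h2 h1
  cases hcond : (t == "CLS" || t == "EOS" || PySem.Str.isIn t pvPunct) with
  | true =>
    have hnh := pvSpecial_not_hash t hcond
    have hnh' : PySem.Chars.startswith t.toList ['#', '#'] = false := by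
      simpa using hnh
    have hpiece : pvPiece tokens i = t := by
      simp [pvPiece, ht, hnh']
    have hcP : (t = "CLS" ∨ t = "EOS") ∨ PySem.Chars.isIn t.toList pvPunct.toList = true := by
      simpa using hcond
    by_cases hcur : pvRender tokens group = ""
    · simp [pvStepA, pvStepB, hcP, hcur, pvRender_singleton, hpiece, pvRender_nil]
    · simp [pvStepA, pvStepB, hcP, hcur, pvRender_singleton, hpiece, pvRender_nil]
  | false =>
    have hcP : ¬ ((t = "CLS" ∨ t = "EOS") ∨ PySem.Chars.isIn t.toList pvPunct.toList = true) := by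
      simpa using hcond
    cases hhash : PySem.Str.startswith t "##" with
    | true =>
      have hhash' : PySem.Chars.startswith t.toList ['#', '#'] = true := by
        simpa using hhash
      have hpiece : pvPiece tokens i = PySem.Str.slice t (some 2) none := by
        simp [pvPiece, ht, hhash']
      have hlen : (PySem.Str.slice t (some 2) none = "") ↔ t.length ≤ 2 := by
        rw [pvEmpty_iff, pvSlice_toList, List.drop_eq_nil_iff, String.length_toList]
      by_cases hl : t.length ≤ 2
      · simp [pvStepA, pvStepB, hcP, hhash', pvRender_append, hpiece, hlen.mpr hl,
          Nat.not_lt.mpr hl]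
      · have hl' : 2 < t.length := Nat.not_le.mp hl
        have hsl : PySem.Str.slice t (some 2) none ≠ "" := fun he => hl (hlen.mp he)
        simp [pvStepA, pvStepB, hcP, hhash', pvRender_append, hpiece, hl', hsl]
    | false =>
      have htne : t ≠ "" := pvNonpunct_ne_empty t hcond
      have hhash' : PySem.Chars.startswith t.toList ['#', '#'] = false := by
        simpa using hhash
      have hpiece : pvPiece tokens i = t := by
        simp [pvPiece, ht, hhash']
      by_cases hcur : pvRender tokens group = ""
      · simp [pvStepA, pvStepB, hcP, hhash', hcur, pvRender_singleton, hpiece, htne]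
      · simp [pvStepA, pvStepB, hcP, hhash', hcur, pvRender_singleton, hpiece, htne]

theorem pvLoop_rel (tokens : List String) (l : List (Int × String))
    (H : ∀ p ∈ l, PySem.List.pyGetD tokens p.1 "" = p.2)
    (sa : List String × List (List Int) × String × List Int)
    (sb : List (List Int) × List Int × Bool)
    (h : pvRel tokens sa sb) :
    pvRel tokens (l.foldl pvStepA sa) (l.foldl pvStepB sb) := by
  induction l generalizing sa sb with
  | nil => simpa using h
  | cons p l ih =>
    obtain ⟨i, t⟩ := p
    simp only [List.foldl_cons]
    exact ih (fun q hq => H q (List.mem_cons_of_mem _ hq)) _ _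
      (pvStep_rel tokens i t (H (i, t) (List.mem_cons_self)) _ _ h)

theorem pvEnum_get (tokens : List String) :
    ∀ p ∈ PySem.List.enumerate tokens, PySem.List.pyGetD tokens p.1 "" = p.2 := by
  intro p hp
  rcases (PySem.List.mem_enumerate_iff tokens 0 p).mp hp with ⟨k, hk, rfl⟩
  simp only [zero_add]
  rw [PySem.List.pyGetD_natCast]
  exact List.getD_eq_getElem tokens "" hk

-- ===== VERDICT (by name: the statement is the Claim_ definition above) =====
theorem mpnet_tokenizer_merge_subtokens_spec : Claim_equal_mpnet_tokenizer_merge_subtokens := by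
  intro tokens _
  unfold Spec_mpnet_tokenizer_merge_subtokens
  have hrel := pvLoop_rel tokens (PySem.List.enumerate tokens) (pvEnum_get tokens)
    ([], [], "", []) ([], [], false)
    ⟨rfl, rfl, rfl, pvRender_nil tokens, by simp⟩
  unfold mpnet_tokenizer_merge_subtokens mpnet_tokenizer_merge_subtokens_alt
  set a := (PySem.List.enumerate tokens).foldl pvStepA ([], [], "", []) with ha
  set b := (PySem.List.enumerate tokens).foldl pvStepB ([], [], false) with hb
  obtain ⟨m, im, cur, ci⟩ := a
  obtain ⟨imB, g, hc⟩ := b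
  unfold pvRel at hrel
  obtain ⟨h1, h2, h3, h4, h5⟩ := hrel
  simp only at h1 h2 h3 h4 h5
  subst h5 h4 h3 h2 h1
  by_cases hcur : pvRender tokens g = ""
  · simp [hcur]
  · simp [hcur]
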